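-- pv_equiv track=rewrite | github.com/ayannamuhammad-nava/lockpicks-data-migration | dm/discovery/schema_introspector.py | generate_schema_diff_report
-- ===== SOURCE A (Python) =====
-- from typing import Any, Dict, List
--
-- def compare_schemas(legacy_schema: Dict, modern_schema: Dict) -> Dict[str, List]:
--     """Compare two schemas and identify differences.
--
--     Returns:
--         Dict with keys: missing_in_modern, missing_in_legacy,
--         type_mismatches, common_columns.
--     """
--     legacy_cols = set(legacy_schema.keys())
--     modern_cols = set(modern_schema.keys())
--
--     missing_in_modern = sorted(legacy_cols - modern_cols)
--     missing_in_legacy = sorted(modern_cols - legacy_cols)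
--     common_columns = sorted(legacy_cols & modern_cols)
--
--     type_mismatches = []
--     for col in common_columns:
--         if legacy_schema[col] != modern_schema[col]:
--             type_mismatches.append({
--                 "column": col,
--                 "legacy_type": legacy_schema[col],
--                 "modern_type": modern_schema[col],
--             })
--
--     return {
--         "missing_in_modern": missing_in_modern,
--         "missing_in_legacy": missing_in_legacy,
--         "type_mismatches": type_mismatches,
--         "common_columns": common_columns,
--     }
--
-- def generate_schema_diff_report(
--     legacy_schema: Dict, modern_schema: Dict, table_name: str
-- ) -> str:
--     """Generate a markdown report of schema differences."""
--     diff = compare_schemas(legacy_schema, modern_schema)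
--
--     report = f"# Schema Diff Report: {table_name}\n\n"
--
--     if diff["missing_in_modern"]:
--         report += "## Columns Missing in Modern System\n\n"
--         for col in diff["missing_in_modern"]:
--             report += f"- **{col}** ({legacy_schema[col]})\n"
--         report += "\n"
--
--     if diff["missing_in_legacy"]:
--         report += "## New Columns in Modern System\n\n"
--         for col in diff["missing_in_legacy"]:
--             report += f"- **{col}** ({modern_schema[col]})\n"
--         report += "\n"
--
--     if diff["type_mismatches"]:
--         report += "## Type Mismatches\n\n"
--         report += "| Column | Legacy Type | Modern Type |\n"
--         report += "|--------|-------------|-------------|\n"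
--         for m in diff["type_mismatches"]:
--             report += f"| {m['column']} | {m['legacy_type']} | {m['modern_type']} |\n"
--         report += "\n"
--
--     report += "## Summary\n\n"
--     report += f"- Common columns: {len(diff['common_columns'])}\n"
--     report += f"- Missing in modern: {len(diff['missing_in_modern'])}\n"
--     report += f"- New in modern: {len(diff['missing_in_legacy'])}\n"
--     report += f"- Type mismatches: {len(diff['type_mismatches'])}\n"
--
--     return report
-- ===== SOURCE B (Python) =====
-- def generate_schema_diff_report(legacy_schema, modern_schema, table_name):
--     """Generate a markdown report of schema differences (single classification pass)."""
--     missing_in_modern, missing_in_legacy, common, mismatches = [], [], [], []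
--     for col in sorted(set(legacy_schema) | set(modern_schema)):
--         in_l = col in legacy_schema
--         if in_l and col in modern_schema:
--             common.append(col)
--             if legacy_schema[col] != modern_schema[col]:
--                 mismatches.append((col, legacy_schema[col], modern_schema[col]))
--         elif in_l:
--             missing_in_modern.append(col)
--         else:
--             missing_in_legacy.append(col)
--
--     parts = [f"# Schema Diff Report: {table_name}\n\n"]
--     if missing_in_modern:
--         parts.append("## Columns Missing in Modern System\n\n")
--         parts.extend(f"- **{c}** ({legacy_schema[c]})\n" for c in missing_in_modern)
--         parts.append("\n")
--     if missing_in_legacy: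
--         parts.append("## New Columns in Modern System\n\n")
--         parts.extend(f"- **{c}** ({modern_schema[c]})\n" for c in missing_in_legacy)
--         parts.append("\n")
--     if mismatches:
--         parts.append("## Type Mismatches\n\n")
--         parts.append("| Column | Legacy Type | Modern Type |\n")
--         parts.append("|--------|-------------|-------------|\n")
--         parts.extend(f"| {c} | {lt} | {mt} |\n" for c, lt, mt in mismatches)
--         parts.append("\n")
--     parts.append("## Summary\n\n")
--     parts.append(f"- Common columns: {len(common)}\n")
--     parts.append(f"- Missing in modern: {len(missing_in_modern)}\n")
--     parts.append(f"- New in modern: {len(missing_in_legacy)}\n")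
--     parts.append(f"- Type mismatches: {len(mismatches)}\n")
--     return "".join(parts)
-- ===== Notes on version B (the rewrite author's own statement) =====
-- stated objective: alternative
-- what changed: Replaces the three set-difference/intersection constructions each followed by its own sort with ONE pass over the sorted union of the key sets that classifies every column into missing/new/common/type-mismatch at once, and builds the report by joining a list of parts instead of repeated '+=' concatenation.
import Mathlib
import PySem

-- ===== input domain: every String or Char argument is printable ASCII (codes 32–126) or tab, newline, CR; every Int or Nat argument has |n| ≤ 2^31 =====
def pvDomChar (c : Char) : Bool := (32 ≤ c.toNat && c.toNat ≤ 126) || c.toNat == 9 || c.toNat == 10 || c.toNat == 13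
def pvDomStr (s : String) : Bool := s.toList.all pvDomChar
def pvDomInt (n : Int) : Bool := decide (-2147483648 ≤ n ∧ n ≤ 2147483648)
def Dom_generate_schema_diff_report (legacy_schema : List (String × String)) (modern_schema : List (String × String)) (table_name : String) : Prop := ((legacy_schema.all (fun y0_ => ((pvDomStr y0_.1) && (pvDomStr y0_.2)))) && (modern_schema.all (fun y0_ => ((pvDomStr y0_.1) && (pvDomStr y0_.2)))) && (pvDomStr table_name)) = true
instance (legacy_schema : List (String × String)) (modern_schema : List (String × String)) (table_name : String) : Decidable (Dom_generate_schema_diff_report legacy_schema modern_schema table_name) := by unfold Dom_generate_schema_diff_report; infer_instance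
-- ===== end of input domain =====

-- ===== PORT A =====
-- B replaces A's three set-ops+sorts by one classifying pass over the sorted key union and joins parts (alternative decomposition, same cost).
-- Dict parameters cross the assoc-list boundary via PySem.Dict.ofList (= Python dict(pairs)); d[col] is ported as getD with "" — exact, col is always a key.
def compare_schemas (legacy_schema : List (String × String)) (modern_schema : List (String × String)) :
    List String × List String × List (String × String × String) × List String :=
  let dl := PySem.Dict.ofList legacy_schema
  let dm := PySem.Dict.ofList modern_schema
  let legacy_cols : PySem.Set String := PySem.Set.ofList dl.keys
  let modern_cols : PySem.Set String := PySem.Set.ofList dm.keys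
  let missing_in_modern := PySem.List.sorted (PySem.Set.diff legacy_cols modern_cols) (fun x => x)
  let missing_in_legacy := PySem.List.sorted (PySem.Set.diff modern_cols legacy_cols) (fun x => x)
  let common_columns := PySem.List.sorted (PySem.Set.inter legacy_cols modern_cols) (fun x => x)
  let type_mismatches := common_columns.foldl (fun acc col =>
    if dl.getD col "" ≠ dm.getD col "" then acc ++ [(col, dl.getD col "", dm.getD col "")] else acc) []
  (missing_in_modern, missing_in_legacy, type_mismatches, common_columns)

def generate_schema_diff_report (legacy_schema : List (String × String)) (modern_schema : List (String × String)) (table_name : String) : String :=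
  let dl := PySem.Dict.ofList legacy_schema
  let dm := PySem.Dict.ofList modern_schema
  let diff := compare_schemas legacy_schema modern_schema
  let report := "# Schema Diff Report: " ++ table_name ++ "\n\n"
  let report := if diff.1 ≠ [] then
      (diff.1.foldl (fun r col => r ++ ("- **" ++ col ++ "** (" ++ dl.getD col "" ++ ")\n"))
        (report ++ "## Columns Missing in Modern System\n\n")) ++ "\n"
    else report
  let report := if diff.2.1 ≠ [] then
      (diff.2.1.foldl (fun r col => r ++ ("- **" ++ col ++ "** (" ++ dm.getD col "" ++ ")\n"))
        (report ++ "## New Columns in Modern System\n\n")) ++ "\n"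
    else report
  let report := if diff.2.2.1 ≠ [] then
      (diff.2.2.1.foldl (fun r m => r ++ ("| " ++ m.1 ++ " | " ++ m.2.1 ++ " | " ++ m.2.2 ++ " |\n"))
        (report ++ "## Type Mismatches\n\n" ++ "| Column | Legacy Type | Modern Type |\n" ++ "|--------|-------------|-------------|\n")) ++ "\n"
    else report
  report ++ "## Summary\n\n" ++ ("- Common columns: " ++ PySem.Int.toStr (diff.2.2.2.length : Int) ++ "\n")
    ++ ("- Missing in modern: " ++ PySem.Int.toStr (diff.1.length : Int) ++ "\n")
    ++ ("- New in modern: " ++ PySem.Int.toStr (diff.2.1.length : Int) ++ "\n")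
    ++ ("- Type mismatches: " ++ PySem.Int.toStr (diff.2.2.1.length : Int) ++ "\n")

-- ===== PORT B =====
def pvClassify (dl dm : PySem.Dict String String)
    (acc : List String × List String × List String × List (String × String × String)) (col : String) :
    List String × List String × List String × List (String × String × String) :=
  if dl.contains col && dm.contains col then
    (acc.1, acc.2.1, acc.2.2.1 ++ [col],
      if dl.getD col "" ≠ dm.getD col "" then acc.2.2.2 ++ [(col, dl.getD col "", dm.getD col "")] else acc.2.2.2)
  else if dl.contains col then (acc.1 ++ [col], acc.2.1, acc.2.2.1, acc.2.2.2)
  else (acc.1, acc.2.1 ++ [col], acc.2.2.1, acc.2.2.2)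

def generate_schema_diff_report_alt (legacy_schema : List (String × String)) (modern_schema : List (String × String)) (table_name : String) : String :=
  let dl := PySem.Dict.ofList legacy_schema
  let dm := PySem.Dict.ofList modern_schema
  let r := (PySem.List.sorted (PySem.Set.union (PySem.Set.ofList dl.keys) dm.keys) (fun x => x)).foldl
      (pvClassify dl dm) ([], [], [], [])
  let parts : List String :=
    ["# Schema Diff Report: " ++ table_name ++ "\n\n"]
    ++ (if r.1 = [] then [] else
        "## Columns Missing in Modern System\n\n" ::
          (r.1.map (fun c => "- **" ++ c ++ "** (" ++ dl.getD c "" ++ ")\n") ++ ["\n"]))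
    ++ (if r.2.1 = [] then [] else
        "## New Columns in Modern System\n\n" ::
          (r.2.1.map (fun c => "- **" ++ c ++ "** (" ++ dm.getD c "" ++ ")\n") ++ ["\n"]))
    ++ (if r.2.2.2 = [] then [] else
        "## Type Mismatches\n\n" :: "| Column | Legacy Type | Modern Type |\n" ::
          "|--------|-------------|-------------|\n" ::
          (r.2.2.2.map (fun p => "| " ++ p.1 ++ " | " ++ p.2.1 ++ " | " ++ p.2.2 ++ " |\n") ++ ["\n"]))
    ++ ["## Summary\n\n",
        "- Common columns: " ++ PySem.Int.toStr (r.2.2.1.length : Int) ++ "\n",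
        "- Missing in modern: " ++ PySem.Int.toStr (r.1.length : Int) ++ "\n",
        "- New in modern: " ++ PySem.Int.toStr (r.2.1.length : Int) ++ "\n",
        "- Type mismatches: " ++ PySem.Int.toStr (r.2.2.2.length : Int) ++ "\n"]
  PySem.Str.join "" parts

-- ===== PRECONDITION & SPEC =====
def Spec_generate_schema_diff_report (legacy_schema : List (String × String)) (modern_schema : List (String × String)) (table_name : String) (out : String) : Prop := out = generate_schema_diff_report_alt legacy_schema modern_schema table_name
instance (legacy_schema : List (String × String)) (modern_schema : List (String × String)) (table_name : String) (out : String) : Decidable (Spec_generate_schema_diff_report legacy_schema modern_schema table_name out) := by unfold Spec_generate_schema_diff_report; infer_instance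

-- ===== CLAIM (what is proved, stated in full; the proofs are below) =====
def Claim_equal_generate_schema_diff_report : Prop := ∀ (legacy_schema : List (String × String)) (modern_schema : List (String × String)) (table_name : String), Dom_generate_schema_diff_report legacy_schema modern_schema table_name → Spec_generate_schema_diff_report legacy_schema modern_schema table_name (generate_schema_diff_report legacy_schema modern_schema table_name)

-- ===== LEMMAS AND PROOFS =====

-- "".join over a cons / an append
theorem pv_join0_cons (a : String) (l : List String) :
    PySem.Str.join "" (a :: l) = a ++ PySem.Str.join "" l := by
  cases l with
  | nil => simp [PySem.Str.join, PySem.Chars.join, List.intercalate]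
  | cons b t => simp [PySem.Str.join, PySem.Chars.join_cons_cons]

theorem pv_join0_append (l1 l2 : List String) :
    PySem.Str.join "" (l1 ++ l2) = PySem.Str.join "" l1 ++ PySem.Str.join "" l2 := by
  induction l1 with
  | nil => simp [PySem.Str.join, PySem.Chars.join, List.intercalate]
  | cons a t ih => rw [List.cons_append, pv_join0_cons, pv_join0_cons, ih, String.append_assoc]

-- a += loop over lines is the join of the mapped lines
theorem pv_foldl_str {α : Type} (f : α → String) (l : List α) (r0 : String) :
    l.foldl (fun r c => r ++ f c) r0 = r0 ++ PySem.Str.join "" (l.map f) := by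
  induction l generalizing r0 with
  | nil => simp [PySem.Str.join, PySem.Chars.join, List.intercalate]
  | cons a t ih => rw [List.map_cons, pv_join0_cons, List.foldl_cons, ih, String.append_assoc]

-- sorting a Nodup list is strictly increasing
theorem pv_sorted_pairwise_lt (xs : List String) (h : xs.Nodup) :
    (PySem.List.sorted xs (fun x => x)).Pairwise (· < ·) := by
  have h1 := PySem.List.sorted_pairwise xs (fun x => x)
  have h2 : (PySem.List.sorted xs (fun x => x)).Nodup :=
    (PySem.List.sorted_perm xs (fun x => x) false).nodup_iff.mpr h
  exact (h1.and h2).imp (fun hab => lt_of_le_of_ne hab.1 hab.2)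

-- sorted(S) as a filter of sorted(U)
theorem pv_sorted_filter (U S : List String) (p : String → Bool) (hU : U.Nodup) (hS : S.Nodup)
    (hmem : ∀ a, a ∈ S ↔ a ∈ U ∧ p a = true) :
    (PySem.List.sorted U (fun x => x)).filter p = PySem.List.sorted S (fun x => x) := by
  refine (PySem.List.sorted_eq_of_perm_of_pairwise_lt S _ (fun x => x) ?_ ?_).symm
  · refine (List.perm_ext_iff_of_nodup ((pv_sorted_pairwise_lt U hU).filter p).nodup hS).mpr ?_
    intro a
    rw [List.mem_filter, PySem.List.mem_sorted, hmem]
  · exact (pv_sorted_pairwise_lt U hU).filter p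

-- the single classification pass computes three filters and a mapped filter
theorem pv_classify_spec (dl dm : PySem.Dict String String) (l : List String)
    (a b c : List String) (d : List (String × String × String)) :
    l.foldl (pvClassify dl dm) (a, b, c, d) =
      (a ++ l.filter (fun x => dl.contains x && !dm.contains x),
       b ++ l.filter (fun x => !dl.contains x),
       c ++ l.filter (fun x => dl.contains x && dm.contains x),
       d ++ (l.filter (fun x => (dl.contains x && dm.contains x) &&
              decide (dl.getD x "" ≠ dm.getD x ""))).map
            (fun x => (x, dl.getD x "", dm.getD x ""))) := by
  induction l generalizing a b c d with
  | nil => simp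
  | cons x t ih =>
    rw [List.foldl_cons]
    by_cases h1 : dl.contains x = true
    · by_cases h2 : dm.contains x = true
      · by_cases h3 : dl.getD x "" = dm.getD x ""
        · rw [show pvClassify dl dm (a, b, c, d) x = (a, b, c ++ [x], d) from by
            simp [pvClassify, h1, h2, h3], ih]
          simp [h1, h2, h3]
        · rw [show pvClassify dl dm (a, b, c, d) x =
              (a, b, c ++ [x], d ++ [(x, dl.getD x "", dm.getD x "")]) from by
            simp [pvClassify, h1, h2, h3], ih]
          simp [h1, h2, h3]
      · rw [show pvClassify dl dm (a, b, c, d) x = (a ++ [x], b, c, d) from by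
          simp [pvClassify, h1, h2], ih]
        simp [h1, h2]
    · rw [show pvClassify dl dm (a, b, c, d) x = (a, b ++ [x], c, d) from by
        simp [pvClassify, h1], ih]
      simp [h1]

-- the classification pass over the sorted union yields exactly A's three sorted set-operations (and the mismatch rows)
theorem pv_lists (dl dm : PySem.Dict String String) (hkl : dl.keys.Nodup) (hkm : dm.keys.Nodup) :
    (PySem.List.sorted (PySem.Set.union (PySem.Set.ofList dl.keys) dm.keys) (fun x => x)).foldl
        (pvClassify dl dm) ([], [], [], []) =
      (PySem.List.sorted (PySem.Set.diff (PySem.Set.ofList dl.keys) (PySem.Set.ofList dm.keys)) (fun x => x),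
       PySem.List.sorted (PySem.Set.diff (PySem.Set.ofList dm.keys) (PySem.Set.ofList dl.keys)) (fun x => x),
       PySem.List.sorted (PySem.Set.inter (PySem.Set.ofList dl.keys) (PySem.Set.ofList dm.keys)) (fun x => x),
       ((PySem.List.sorted (PySem.Set.inter (PySem.Set.ofList dl.keys) (PySem.Set.ofList dm.keys)) (fun x => x)).filter
          (fun x => decide (dl.getD x "" ≠ dm.getD x ""))).map (fun x => (x, dl.getD x "", dm.getD x ""))) := by
  rw [pv_classify_spec]
  rw [PySem.Set.ofList_eq_self_of_nodup dl.keys hkl, PySem.Set.ofList_eq_self_of_nodup dm.keys hkm]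
  have hU : (PySem.Set.union dl.keys dm.keys).Nodup := PySem.Set.nodup_union dl.keys dm.keys hkl
  have h1 := pv_sorted_filter (PySem.Set.union dl.keys dm.keys) (PySem.Set.diff dl.keys dm.keys)
      (fun x => dl.contains x && !dm.contains x) hU (PySem.Set.nodup_diff dl.keys dm.keys hkl) ?_
  have h2 := pv_sorted_filter (PySem.Set.union dl.keys dm.keys) (PySem.Set.diff dm.keys dl.keys)
      (fun x => !dl.contains x) hU (PySem.Set.nodup_diff dm.keys dl.keys hkm) ?_
  have h3 := pv_sorted_filter (PySem.Set.union dl.keys dm.keys) (PySem.Set.inter dl.keys dm.keys)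
      (fun x => dl.contains x && dm.contains x) hU (PySem.Set.nodup_inter dl.keys dm.keys hkl) ?_
  · have h4 : List.filter (fun x => (dl.contains x && dm.contains x) && decide (dl.getD x "" ≠ dm.getD x ""))
          (PySem.List.sorted (PySem.Set.union dl.keys dm.keys) (fun x => x)) =
        List.filter (fun x => decide (dl.getD x "" ≠ dm.getD x ""))
          (PySem.List.sorted (PySem.Set.inter dl.keys dm.keys) (fun x => x)) := by
      rw [← h3, List.filter_filter]
      exact List.filter_congr fun a _ => by rw [Bool.and_comm]
    rw [List.nil_append, List.nil_append, List.nil_append, List.nil_append, h1, h2, h3, h4]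
  · intro a
    simp [PySem.Set.mem_union, PySem.Dict.contains_eq_decide_mem_keys]
    tauto
  · intro a
    simp [PySem.Set.mem_diff, PySem.Set.mem_union, PySem.Dict.contains_eq_decide_mem_keys]
    tauto
  · intro a
    simp [PySem.Set.mem_union, PySem.Dict.contains_eq_decide_mem_keys]
    tauto

-- a prop-conditional append loop is a filter+map
theorem pv_foldl_append_if_prop {α β : Type} (P : α → Prop) [DecidablePred P] (f : α → β) (l : List α) :
    l.foldl (fun acc x => if P x then acc ++ [f x] else acc) [] =
      (l.filter (fun x => decide (P x))).map f := by
  have h := PySem.List.foldl_append_if (fun x => decide (P x)) f l []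
  simpa using h

-- "".join [] = ""
theorem pv_join0_nil : PySem.Str.join "" [] = "" := by
  simp [PySem.Str.join, PySem.Chars.join, List.intercalate]

-- ===== VERDICT (by name: the statement is the Claim_ definition above) =====
theorem generate_schema_diff_report_spec : Claim_equal_generate_schema_diff_report := by
  intro legacy modern tn _
  unfold Spec_generate_schema_diff_report
  simp only [generate_schema_diff_report, generate_schema_diff_report_alt, compare_schemas]
  rw [pv_lists _ _ (PySem.Dict.nodup_keys_ofList legacy) (PySem.Dict.nodup_keys_ofList modern)]
  rw [pv_foldl_append_if_prop]
  set dl := PySem.Dict.ofList legacy with hdl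
  set dm := PySem.Dict.ofList modern with hdm
  set L1 := PySem.List.sorted ((PySem.Set.ofList dl.keys).diff (PySem.Set.ofList dm.keys)) (fun x => x) with hL1
  set L2 := PySem.List.sorted ((PySem.Set.ofList dm.keys).diff (PySem.Set.ofList dl.keys)) (fun x => x) with hL2
  set L3 := PySem.List.sorted ((PySem.Set.ofList dl.keys).inter (PySem.Set.ofList dm.keys)) (fun x => x) with hL3
  by_cases h1 : L1 = [] <;> by_cases h2 : L2 = [] <;>
    by_cases h3 : L3.filter (fun x => decide (dl.getD x "" ≠ dm.getD x "")) = [] <;>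
    (simp only [h1, h2, h3, List.map_eq_nil_iff, List.map_nil, ne_eq, not_false_eq_true,
        not_true_eq_false, ite_true, ite_false]
     simp [pv_foldl_str, pv_join0_append, pv_join0_cons, pv_join0_nil,
       String.append_assoc, String.append_empty]
     all_goals rw [← String.toList_inj]
     all_goals simp [String.toList_append])
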